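-- pv_equiv track=rewrite | github.com/Kolhoznik44/pythonAcademTop | src/homework/hw12 Модуль 7. Сортировка и поиск часть 3/HW11 Сортировка и поиск.py | get_unique_elements
-- ===== SOURCE A (Python) =====
-- def get_unique_elements(lists):
--     """Возвращает элементы, которые встречаются только в одном подсписке из списка списков."""
--     all_elems = []
--     for lst in lists:
--         all_elems.extend(lst)
--     unique_elems = []
--     for i, lst in enumerate(lists):
--         others = lists[:i] + lists[i+1:]
--         for elem in lst:
--             found = False
--             for other in others:
--                 if elem in other:
--                     found = True
--                     break
--             if not found and elem not in unique_elems: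
--                 unique_elems.append(elem)
--     return unique_elems
-- ===== SOURCE B (Python) =====
-- def get_unique_elements(lists):
--     """Возвращает элементы, которые встречаются только в одном подсписке из списка списков."""
--     count = {}
--     for lst in lists:
--         for elem in set(lst):
--             count[elem] = count.get(elem, 0) + 1
--     result = []
--     for lst in lists:
--         for elem in lst:
--             if count.get(elem, 0) == 1 and elem not in result:
--                 result.append(elem)
--     return result
-- ===== Notes on version B (the rewrite author's own statement) =====
-- stated objective: faster
-- what changed: Replaced A's per-element scan of all other sublists (with list slicing per index) by a single pass building a dict counting how many distinct sublists contain each element, then one ordered emission pass keeping elements whose count is 1.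
import Mathlib
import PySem

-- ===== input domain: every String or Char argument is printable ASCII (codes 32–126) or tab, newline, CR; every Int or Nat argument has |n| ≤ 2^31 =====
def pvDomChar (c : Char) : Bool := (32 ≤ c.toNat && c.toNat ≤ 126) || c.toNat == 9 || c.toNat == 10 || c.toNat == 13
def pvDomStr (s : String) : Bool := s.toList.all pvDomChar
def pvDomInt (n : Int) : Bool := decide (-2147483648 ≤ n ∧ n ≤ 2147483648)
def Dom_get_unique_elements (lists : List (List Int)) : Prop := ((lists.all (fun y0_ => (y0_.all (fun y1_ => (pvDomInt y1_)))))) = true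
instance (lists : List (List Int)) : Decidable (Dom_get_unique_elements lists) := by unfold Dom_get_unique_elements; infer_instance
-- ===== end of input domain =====

-- B replaces A's per-element scan of all other sublists by a counting dict built in one pass
-- plus one ordered emission pass (objective: faster; same return value on every input).


-- ===== PORT A =====
def get_unique_elements (lists : List (List Int)) : List Int :=
  let _all_elems : List Int := lists.foldl (fun a lst => a ++ lst) []
  (PySem.List.enumerate lists).foldl
    (fun acc p =>
      let others : List (List Int) :=
        PySem.List.slice lists none (some p.1) ++ PySem.List.slice lists (some (p.1 + 1)) none
      p.2.foldl
        (fun acc elem =>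
          let found : Bool := others.any (fun other => other.contains elem)
          if !found && !(acc.contains elem) then acc ++ [elem] else acc)
        acc)
    []

-- ===== PORT B =====
def get_unique_elements_alt (lists : List (List Int)) : List Int :=
  let count : PySem.Dict Int Int :=
    lists.foldl
      (fun d lst => (PySem.Set.ofList lst).foldl (fun d elem => d.insert elem (d.getD elem 0 + 1)) d)
      PySem.Dict.empty
  lists.foldl
    (fun res lst =>
      lst.foldl
        (fun res elem =>
          if (count.getD elem 0 == 1) && !(res.contains elem) then res ++ [elem] else res)
        res)
    []

-- ===== PRECONDITION & SPEC =====
def Spec_get_unique_elements (lists : List (List Int)) (out : List Int) : Prop := out = get_unique_elements_alt lists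
instance (lists : List (List Int)) (out : List Int) : Decidable (Spec_get_unique_elements lists out) := by unfold Spec_get_unique_elements; infer_instance

-- ===== CLAIM (what is proved, stated in full; the proofs are below) =====
def Claim_equal_get_unique_elements : Prop := ∀ (lists : List (List Int)), Dom_get_unique_elements lists → Spec_get_unique_elements lists (get_unique_elements lists)

-- ===== LEMMAS AND PROOFS =====

-- the dict built by B holds, for each element, the number of sublists containing it
lemma cnt_getD (ls : List (List Int)) (e : Int) :
    (ls.foldl
      (fun d lst => (PySem.Set.ofList lst).foldl (fun d elem => d.insert elem (d.getD elem 0 + 1)) d)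
      (PySem.Dict.empty : PySem.Dict Int Int)).getD e 0
    = (ls.countP (fun l => decide (e ∈ l)) : Int) := by
  rw [← List.foldl_flatMap, PySem.Dict.foldl_insert_getD_add_one_eq_counter,
    PySem.Dict.getD_counter]
  congr 1
  induction ls with
  | nil => simp
  | cons l ls ih =>
    simp only [List.flatMap_cons, List.count_append, List.countP_cons, ih]
    by_cases h : e ∈ l
    · have h1 : List.count e (PySem.Set.ofList l) = 1 :=
        List.count_eq_one_of_mem (by rw [← PySem.List.dedup_eq_ofList]; exact PySem.List.nodup_dedup l)
          (by rw [← PySem.List.dedup_eq_ofList]; exact (PySem.List.mem_dedup l e).mpr h)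
      rw [h1]
      simp [h]
      omega
    · have h0 : List.count e (PySem.Set.ofList l) = 0 := by
        rw [List.count_eq_zero, ← PySem.List.dedup_eq_ofList, PySem.List.mem_dedup]; exact h
      simp [h0, h]

-- per-element equality of the two append conditions, at position pre.length of pre ++ lst :: rest
lemma cond_eq (pre rest : List (List Int)) (lst : List Int) (e : Int) (he : e ∈ lst) :
    (((pre ++ lst :: rest).foldl
      (fun d l => (PySem.Set.ofList l).foldl (fun d elem => d.insert elem (d.getD elem 0 + 1)) d)
      (PySem.Dict.empty : PySem.Dict Int Int)).getD e 0 == 1)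
    = !((pre ++ rest).any (fun other => other.contains e)) := by
  rw [cnt_getD (pre ++ lst :: rest) e]
  have h2 : (pre ++ lst :: rest).countP (fun l => decide (e ∈ l))
      = (pre ++ rest).countP (fun l => decide (e ∈ l)) + 1 := by
    simp [List.countP_append, he]
    omega
  by_cases hany : ((pre ++ rest).any (fun other => other.contains e)) = true
  · rw [hany]
    simp only [Bool.not_true, beq_eq_false_iff_ne, ne_eq]
    intro hc
    rcases List.any_eq_true.mp hany with ⟨x, hx, hxe⟩
    have h1 : 0 < (pre ++ rest).countP (fun l => decide (e ∈ l)) := by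
      rw [List.countP_pos_iff]
      exact ⟨x, hx, by simpa using hxe⟩
    rw [h2] at hc
    omega
  · have hf : ((pre ++ rest).any (fun other => other.contains e)) = false :=
      Bool.eq_false_iff.mpr hany
    rw [hf]
    simp only [Bool.not_false, beq_iff_eq]
    have hz : (pre ++ rest).countP (fun l => decide (e ∈ l)) = 0 :=
      List.countP_eq_zero.mpr (fun x hx => by
        have := List.any_eq_false.mp hf x hx
        simpa using this)
    rw [h2, hz]
    norm_num

-- the outer loops agree, generalizing over the already-processed prefix and the accumulator
lemma outer_eq (lists : List (List Int)) :
    ∀ (rest pre : List (List Int)) (acc : List Int), lists = pre ++ rest →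
    (PySem.List.enumerate rest (pre.length : Int)).foldl
      (fun acc p =>
        let others : List (List Int) :=
          PySem.List.slice lists none (some p.1) ++ PySem.List.slice lists (some (p.1 + 1)) none
        p.2.foldl
          (fun acc elem =>
            let found : Bool := others.any (fun other => other.contains elem)
            if !found && !(acc.contains elem) then acc ++ [elem] else acc)
          acc)
      acc
    = rest.foldl
        (fun res lst =>
          lst.foldl
            (fun res elem =>
              if ((lists.foldl
                    (fun d l => (PySem.Set.ofList l).foldl (fun d e => d.insert e (d.getD e 0 + 1)) d)
                    (PySem.Dict.empty : PySem.Dict Int Int)).getD elem 0 == 1) && !(res.contains elem)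
              then res ++ [elem] else res)
            res)
        acc := by
  intro rest
  induction rest with
  | nil => intro pre acc h; simp [PySem.List.enumerate]
  | cons lst rest' ih =>
    intro pre acc h
    rw [PySem.List.enumerate_cons, List.foldl_cons, List.foldl_cons]
    have hsl1 : PySem.List.slice lists none (some (pre.length : Int)) = pre := by
      rw [PySem.List.slice_to_natCast, h, List.take_left]
    have hsl2 : PySem.List.slice lists (some ((pre.length : Int) + 1)) none = rest' := by
      have : ((pre.length : Int) + 1) = ((pre.length + 1 : Nat) : Int) := by push_cast; ring
      rw [this, PySem.List.slice_from_natCast, h]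
      rw [show pre.length + 1 = pre.length + 1 from rfl, ← List.drop_drop,
        List.drop_left, List.drop_one, List.tail_cons]
    have hinner :
        lst.foldl
          (fun acc elem =>
            let found : Bool :=
              (PySem.List.slice lists none (some (pre.length : Int)) ++
                PySem.List.slice lists (some ((pre.length : Int) + 1)) none).any
                (fun other => other.contains elem)
            if !found && !(acc.contains elem) then acc ++ [elem] else acc)
          acc
        = lst.foldl
            (fun res elem =>
              if ((lists.foldl
                    (fun d l => (PySem.Set.ofList l).foldl (fun d e => d.insert e (d.getD e 0 + 1)) d)
                    (PySem.Dict.empty : PySem.Dict Int Int)).getD elem 0 == 1) && !(res.contains elem)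
              then res ++ [elem] else res)
            acc := by
      apply PySem.List.foldl_congr_mem
      intro a e hme
      rw [h] at hsl1 hsl2 ⊢
      simp only [hsl1, hsl2, cond_eq pre rest' lst e hme]
    rw [hinner]
    have hlen : (pre.length : Int) + 1 = (((pre ++ [lst]).length : Nat) : Int) := by
      simp
    rw [hlen]
    exact ih (pre ++ [lst]) _ (by simp [h])

-- ===== VERDICT (by name: the statement is the Claim_ definition above) =====
theorem get_unique_elements_spec : Claim_equal_get_unique_elements := by
  intro lists _
  unfold Spec_get_unique_elements get_unique_elements get_unique_elements_alt
  simpa using outer_eq lists lists [] [] rfl
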